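-- pv_equiv track=rewrite | github.com/aliwo/swblog | _drafts/traverse_right.py | traverse_right
-- ===== SOURCE A (Python) =====
-- def traverse_right(done, i):
--     cnt = 0
--
--     for _ in range(len(done)):
--         if done[i] == False:
--             break
--         i = i + 1 if i + 1 < len(done) else 0
--         cnt += 1
--
--     if cnt == len(done): # 못 찾았다는 뜻
--         return 0
--
--     done[i] = True
--     cnt += traverse_right(done, i)
--     done[i] = False
--     return cnt
-- ===== SOURCE B (Python) =====
-- def traverse_right(done, i):
--     n = len(done)
--     if n == 0:
--         return 0
--     return max(((p - i) % n for p in range(n) if not done[p]), default=0)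
-- ===== Notes on version B (the rewrite author's own statement) =====
-- stated objective: faster
-- what changed: A repeatedly walks rightwards from i to the next empty slot and recurses after marking it (quadratic rescans); B computes the answer in one pass as the maximum circular distance (p - i) mod n over the False positions, with 0 when there are none.
import Mathlib
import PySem

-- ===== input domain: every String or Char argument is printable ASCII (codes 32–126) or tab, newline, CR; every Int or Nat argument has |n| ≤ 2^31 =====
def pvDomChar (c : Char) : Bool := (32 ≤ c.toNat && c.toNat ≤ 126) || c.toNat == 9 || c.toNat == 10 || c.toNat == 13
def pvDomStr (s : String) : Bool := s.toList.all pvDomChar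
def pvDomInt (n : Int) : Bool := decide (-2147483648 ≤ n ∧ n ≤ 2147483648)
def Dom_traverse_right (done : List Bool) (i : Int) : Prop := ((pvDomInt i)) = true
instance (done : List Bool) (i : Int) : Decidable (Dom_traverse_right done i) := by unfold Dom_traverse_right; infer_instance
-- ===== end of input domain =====

-- B replaces A's quadratic walk-and-recurse with a single max-of-circular-distances pass; equivalence is about the
-- return value only (A mutates `done` during recursion but restores it before returning, so there is no net mutation).

-- ===== PORT A =====
-- the `for _ in range(len(done))` search loop: returns (final i, cnt)
def walkA (done : List Bool) : Nat → Int → Int × Int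
  | 0, i => (i, 0)
  | fuel + 1, i =>
      if ((PySem.List.pyGet? done i).getD false) = false then (i, 0)
      else
        let i' := if i + 1 < (done.length : Int) then i + 1 else 0
        let r := walkA done fuel i'
        (r.1, r.2 + 1)

-- done[i] = True  (negative index wraps, as in Python; i is in range whenever A's execution reaches this)
def pySetTrue (done : List Bool) (i : Int) : List Bool :=
  if i < 0 then done.set (i + done.length).toNat true else done.set i.toNat true

-- the recursion of A; fuel (length+1) bounds the recursion depth, which Python bounds implicitly (each
-- recursive call has flipped one False to True, so the depth never exceeds length+1)
def trA : Nat → List Bool → Int → Int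
  | 0, _, _ => 0
  | fuel + 1, done, i =>
      let r := walkA done done.length i
      if r.2 = (done.length : Int) then 0
      else r.2 + trA fuel (pySetTrue done r.1) r.1

def traverse_right (done : List Bool) (i : Int) : Int :=
  trA (done.length + 1) done i

-- ===== PORT B =====
def traverse_right_alt (done : List Bool) (i : Int) : Int :=
  if done.length = 0 then 0
  else
    -- max(((p - i) % n for p in range(n) if not done[p]), default=0)
    match ((List.range done.length).filter (fun p => !done.getD p false)).map
            (fun (p : Nat) => PySem.Int.mod ((p : Int) - i) (done.length : Int)) with
    | [] => 0
    | x :: t => t.foldl max x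

-- ===== PRECONDITION & SPEC =====
-- Pre_ excludes exactly the inputs where A raises IndexError: a non-empty list with i out of Python's index range.
def Pre_traverse_right (done : List Bool) (i : Int) : Prop :=
  done = [] ∨ (-(done.length : Int) ≤ i ∧ i < (done.length : Int))
instance (done : List Bool) (i : Int) : Decidable (Pre_traverse_right done i) := by
  unfold Pre_traverse_right; infer_instance
def pvWitness_traverse_right : List Bool × Int := ([false, true, false], -2)

def Spec_traverse_right (done : List Bool) (i : Int) (out : Int) : Prop := out = traverse_right_alt done i
instance (done : List Bool) (i : Int) (out : Int) : Decidable (Spec_traverse_right done i out) := by unfold Spec_traverse_right; infer_instance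

-- ===== CLAIM (what is proved, stated in full; the proofs are below) =====
def Claim_equal_traverse_right : Prop := ∀ (done : List Bool) (i : Int), Dom_traverse_right done i → Pre_traverse_right done i → Spec_traverse_right done i (traverse_right done i)
-- ===== LEMMAS AND PROOFS =====

-- normalized (Nat) index of a possibly-negative in-range Python index
def toIdx (n : Nat) (i : Int) : Nat := (if i < 0 then i + n else i).toNat

-- rightward circular distance from start i to position p
def cdist (n : Nat) (i : Int) (p : Nat) : Int := ((p : Int) - i) % (n : Int)

-- the positions of the False entries
def falsePos (done : List Bool) : List Nat :=
  (List.range done.length).filter (fun p => !done.getD p false)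

theorem mem_falsePos {done : List Bool} {p : Nat} :
    p ∈ falsePos done ↔ p < done.length ∧ done.getD p false = false := by
  simp [falsePos, List.mem_filter, List.mem_range]

theorem toIdx_lt {n : Nat} {i : Int} (hn : 0 < n) (h1 : -(n : Int) ≤ i) (h2 : i < n) :
    toIdx n i < n := by
  unfold toIdx; split <;> omega

theorem read_eq (done : List Bool) (i : Int) (h1 : -(done.length : Int) ≤ i)
    (h2 : i < (done.length : Int)) :
    ((PySem.List.pyGet? done i).getD false) = done.getD (toIdx done.length i) false := by
  unfold PySem.List.pyGet? PySem.List.pyIdx? toIdx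
  by_cases h : i < 0
  · simp only [if_neg (by omega : ¬ (0:Int) ≤ i), if_pos h1, if_pos h, Option.bind_some]
    have hk : done.length - (-i).toNat = (i + (done.length : Int)).toNat := by omega
    rw [hk, List.getD_eq_getElem?_getD]
  · simp only [if_pos (by omega : (0:Int) ≤ i), if_pos h2, if_neg h, Option.bind_some]
    rw [List.getD_eq_getElem?_getD]

theorem pySetTrue_eq (done : List Bool) (i : Int) (h1 : -(done.length : Int) ≤ i)
    (h2 : i < (done.length : Int)) :
    pySetTrue done i = done.set (toIdx done.length i) true := by
  unfold pySetTrue toIdx; split <;> rfl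

theorem cdist_nonneg {n : Nat} (hn : 0 < n) (i : Int) (p : Nat) : 0 ≤ cdist n i p :=
  Int.emod_nonneg _ (by omega)

theorem cdist_lt {n : Nat} (hn : 0 < n) (i : Int) (p : Nat) : cdist n i p < n :=
  Int.emod_lt_of_pos _ (by omega)

theorem cdist_toIdx_self {n : Nat} {i : Int} (hn : 0 < n) (h1 : -(n : Int) ≤ i) (h2 : i < n) :
    cdist n i (toIdx n i) = 0 := by
  unfold cdist toIdx
  split <;> rename_i h
  · have he : ((i + (n : Int)).toNat : Int) - i = (n : Int) * 1 := by omega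
    rw [he]; simp
  · have he : ((i.toNat : Int)) - i = (n : Int) * 0 := by omega
    rw [he]; simp

theorem cdist_eq_zero {n : Nat} {i : Int} {p : Nat} (hn : 0 < n) (h1 : -(n : Int) ≤ i)
    (h2 : i < n) (hp : p < n) (h : cdist n i p = 0) : p = toIdx n i := by
  unfold cdist at h
  obtain ⟨k, hk⟩ := Int.dvd_of_emod_eq_zero h
  have hk0 : 0 ≤ k := by nlinarith
  have hk1 : k ≤ 1 := by nlinarith
  have : k = 0 ∨ k = 1 := by omega
  unfold toIdx
  rcases this with h | h <;> subst h <;> split <;> omega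

theorem cdist_next {n : Nat} {i : Int} {p : Nat} (hn : 0 < n) (h1 : -(n : Int) ≤ i)
    (h2 : i < n) (hd : 1 ≤ cdist n i p) :
    cdist n (if i + 1 < (n : Int) then i + 1 else 0) p = cdist n i p - 1 := by
  have hq := Int.ediv_add_emod ((p : Int) - i) n
  have hnn := cdist_nonneg hn i p
  have hlt := cdist_lt hn i p
  unfold cdist at *
  set d := ((p : Int) - i) % (n : Int) with hdd
  set q := ((p : Int) - i) / (n : Int) with hqq
  split <;> rename_i h
  · have he : (p : Int) - (i + 1) = (d - 1) + (n : Int) * q := by omega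
    rw [he, Int.add_mul_emod_self_left]
    exact Int.emod_eq_of_lt (by omega) (by omega)
  · have he : (p : Int) - 0 = (d - 1) + (n : Int) * (q + 1) := by rw [Int.mul_add]; push_cast; omega
    rw [he, Int.add_mul_emod_self_left]
    exact Int.emod_eq_of_lt (by omega) (by omega)

-- shifting the start to a position at distance c subtracts c from every distance ≥ c
-- shifting the start to a position at distance c subtracts c from every distance >= c
theorem cdist_shift {n : Nat} {i pi : Int} {p : Nat} (hn : 0 < n)
    (hp1 : -(n : Int) ≤ pi) (hp2 : pi < n) (hp : p < n) {c : Int}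
    (hc : cdist n i (toIdx n pi) = c) (hcp : c ≤ cdist n i p) :
    cdist n pi p = cdist n i p - c := by
  have hq1 := Int.ediv_add_emod (((toIdx n pi) : Int) - i) n
  have hq2 := Int.ediv_add_emod ((p : Int) - i) n
  have hnn := cdist_nonneg hn i p
  have hlt := cdist_lt hn i p
  have hnn2 := cdist_nonneg hn i (toIdx n pi)
  have hlt2 := cdist_lt hn i (toIdx n pi)
  unfold cdist at *
  set q1 := (((toIdx n pi) : Int) - i) / (n : Int)
  set q2 := ((p : Int) - i) / (n : Int)
  set dp := ((p : Int) - i) % (n : Int)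
  set dq := (((toIdx n pi) : Int) - i) % (n : Int)
  have hti : ((toIdx n pi : Int)) = pi ∨ ((toIdx n pi : Int)) = pi + n := by
    unfold toIdx; split <;> omega
  rcases hti with hti | hti
  · have he : (p : Int) - pi = (dp - c) + (n : Int) * (q2 - q1) := by
      rw [Int.mul_sub]; omega
    rw [he, Int.add_mul_emod_self_left]
    exact Int.emod_eq_of_lt (by omega) (by omega)
  · have he : (p : Int) - pi = (dp - c) + (n : Int) * (q2 - q1 + 1) := by
      rw [Int.mul_add, Int.mul_sub, Int.mul_one]; omega
    rw [he, Int.add_mul_emod_self_left]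
    exact Int.emod_eq_of_lt (by omega) (by omega)

-- ---- fold-max toolkit ----
theorem foldl_max_shift (L : List Int) (a : Int) : ∀ b, L.foldl max (max a b) = max a (L.foldl max b) := by
  induction L with
  | nil => intro b; simp
  | cons c L ih =>
      intro b
      simp only [List.foldl_cons]
      rw [max_assoc, ih]

theorem foldl_max_add (L : List Nat) (g : Nat → Int) (c : Int) :
    ∀ a, (L.map (fun p => c + g p)).foldl max (c + a) = c + (L.map g).foldl max a := by
  induction L with
  | nil => intro a; simp
  | cons h L ih =>
      intro a
      simp only [List.map_cons, List.foldl_cons, max_add_add_left]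
      exact ih (max a (g h))

theorem foldl_max_filter (g : Nat → Bool) (f : Nat → Int) :
    ∀ (L : List Nat) (a : Int), 0 ≤ a → (∀ x ∈ L, g x = false → f x ≤ 0) →
    ((L.filter g).map f).foldl max a = (L.map f).foldl max a := by
  intro L
  induction L with
  | nil => intro a _ _; rfl
  | cons h L ih =>
      intro a ha hsm
      by_cases hg : g h
      · simp only [List.filter_cons, hg, if_pos, List.map_cons, List.foldl_cons]
        exact ih _ (le_trans ha (le_max_left _ _)) (fun x hx => hsm x (List.mem_cons_of_mem _ hx))
      · simp only [List.filter_cons, Bool.not_eq_true] at *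
        rw [if_neg (by simp [hg]), List.map_cons, List.foldl_cons,
          max_eq_left (le_trans (hsm h List.mem_cons_self hg) ha)]
        exact ih _ ha (fun x hx => hsm x (List.mem_cons_of_mem _ hx))

-- ---- characterization of the walk ----
theorem walkA_all_true {done : List Bool} (hF : falsePos done = []) (hn : 0 < done.length) :
    ∀ (fuel : Nat) (i : Int), -(done.length : Int) ≤ i → i < done.length →
    (walkA done fuel i).2 = fuel := by
  intro fuel
  induction fuel with
  | zero => intro i _ _; rfl
  | succ f ih =>
      intro i h1 h2
      have hread : done.getD (toIdx done.length i) false = true := by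
        by_contra hcon
        have : toIdx done.length i ∈ falsePos done :=
          mem_falsePos.mpr ⟨toIdx_lt hn h1 h2, by simpa using hcon⟩
        simp [hF] at this
      rw [walkA, read_eq done i h1 h2, hread]
      simp only [Bool.true_eq_false, if_false]
      have := ih (if i + 1 < (done.length : Int) then i + 1 else 0)
        (by split <;> omega) (by split <;> omega)
      push_cast
      rw [this]

theorem walkA_finds {done : List Bool} (hn : 0 < done.length) :
    ∀ (c : Nat) (i : Int) (fuel : Nat), c < fuel → -(done.length : Int) ≤ i → i < done.length →
    (∀ p ∈ falsePos done, (c : Int) ≤ cdist done.length i p) →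
    (∃ p ∈ falsePos done, cdist done.length i p = c) →
    ∃ pi, walkA done fuel i = (pi, (c : Int)) ∧ -(done.length : Int) ≤ pi ∧ pi < done.length ∧
      toIdx done.length pi ∈ falsePos done ∧ cdist done.length i (toIdx done.length pi) = c := by
  intro c
  induction c with
  | zero =>
      intro i fuel hf h1 h2 hmin hex
      obtain ⟨p, hp, hp0⟩ := hex
      have hpi : p = toIdx done.length i :=
        cdist_eq_zero hn h1 h2 (mem_falsePos.mp hp).1 (by simpa using hp0)
      have hread : done.getD (toIdx done.length i) false = false := by
        rw [← hpi]; exact (mem_falsePos.mp hp).2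
      cases fuel with
      | zero => omega
      | succ f =>
          refine ⟨i, ?_, h1, h2, ?_, ?_⟩
          · rw [walkA, read_eq done i h1 h2, hread]; simp
          · rw [← hpi]; exact hp
          · rw [← hpi]; exact hp0
  | succ c ih =>
      intro i fuel hf h1 h2 hmin hex
      have hread : done.getD (toIdx done.length i) false = true := by
        by_contra hcon
        have hmem : toIdx done.length i ∈ falsePos done :=
          mem_falsePos.mpr ⟨toIdx_lt hn h1 h2, by simpa using hcon⟩
        have hle := hmin _ hmem
        rw [cdist_toIdx_self hn h1 h2] at hle
        push_cast at hle; omega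
      cases fuel with
      | zero => omega
      | succ f =>
          set i' := if i + 1 < (done.length : Int) then i + 1 else 0 with hi'
          have hb1 : -(done.length : Int) ≤ i' := by rw [hi']; split <;> omega
          have hb2 : i' < done.length := by rw [hi']; split <;> omega
          have hmin' : ∀ p ∈ falsePos done, (c : Int) ≤ cdist done.length i' p := by
            intro p hp
            have h := hmin p hp
            rw [hi', cdist_next hn h1 h2 (by push_cast at h ⊢; omega)]
            push_cast at h ⊢; omega
          have hex' : ∃ p ∈ falsePos done, cdist done.length i' p = c := by
            obtain ⟨p, hp, hpc⟩ := hex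
            refine ⟨p, hp, ?_⟩
            rw [hi', cdist_next hn h1 h2 (by rw [hpc]; push_cast; omega), hpc]
            push_cast; ring
          obtain ⟨pi, hw, hp1, hp2, hmem, hdist⟩ := ih i' f (by omega) hb1 hb2 hmin' hex'
          have hge : 1 ≤ cdist done.length i (toIdx done.length pi) := by
            have := hmin _ hmem; push_cast at this; omega
          refine ⟨pi, ?_, hp1, hp2, hmem, ?_⟩
          · rw [walkA, read_eq done i h1 h2, hread, if_neg (by simp)]
            show ((walkA done f i').1, (walkA done f i').2 + 1) = _
            rw [hw]
            push_cast
            rfl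
          · have hnext := cdist_next (p := toIdx done.length pi) hn h1 h2 hge
            rw [← hi'] at hnext
            rw [hnext] at hdist
            push_cast at hdist ⊢; omega

-- B's value, rewritten through falsePos and emod
def Bval (done : List Bool) (i : Int) : Int :=
  ((falsePos done).map (fun (p : Nat) => ((p : Int) - i) % (done.length : Int))).foldl max 0

theorem alt_eq_Bval (done : List Bool) (i : Int) (hn : 0 < done.length) :
    traverse_right_alt done i = Bval done i := by
  unfold traverse_right_alt Bval falsePos
  rw [if_neg (by omega)]
  have hmap : ((List.range done.length).filter (fun p => !done.getD p false)).map
      (fun (p : Nat) => PySem.Int.mod ((p : Int) - i) (done.length : Int)) =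
      ((List.range done.length).filter (fun p => !done.getD p false)).map
      (fun (p : Nat) => ((p : Int) - i) % (done.length : Int)) :=
    List.map_congr_left (fun p _ => PySem.Int.mod_eq_emod_of_pos (by omega))
  rw [hmap]
  cases hL : ((List.range done.length).filter (fun p => !done.getD p false)).map
      (fun (p : Nat) => ((p : Int) - i) % (done.length : Int)) with
  | nil => rfl
  | cons x t =>
      have hx : 0 ≤ x := by
        have : x ∈ ((List.range done.length).filter (fun p => !done.getD p false)).map
            (fun (p : Nat) => ((p : Int) - i) % (done.length : Int)) := by rw [hL]; exact List.mem_cons_self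
        obtain ⟨p, _, hpe⟩ := List.mem_map.mp this
        rw [← hpe]
        exact Int.emod_nonneg _ (by omega)
      simp only [List.foldl_cons]
      rw [max_eq_right hx]

theorem exists_min (l : List Nat) (h : l ≠ []) : ∃ c ∈ l, ∀ x ∈ l, c ≤ x := by
  induction l with
  | nil => exact absurd rfl h
  | cons a l ih =>
      rcases l with _ | ⟨b, t⟩
      · exact ⟨a, List.mem_singleton_self a, by intro x hx; simp at hx; omega⟩
      · obtain ⟨c, hc, hcm⟩ := ih (by simp)
        by_cases hac : a ≤ c
        · exact ⟨a, List.mem_cons_self, by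
            intro x hx
            rcases List.mem_cons.mp hx with h | h
            · omega
            · exact le_trans hac (hcm x h)⟩
        · exact ⟨c, List.mem_cons_of_mem _ hc, by
            intro x hx
            rcases List.mem_cons.mp hx with h | h
            · omega
            · exact hcm x h⟩

theorem falsePos_set {done : List Bool} {q : Nat} (hq : q < done.length) :
    falsePos (done.set q true) = (falsePos done).filter (fun p => p ≠ q) := by
  unfold falsePos
  rw [List.length_set, List.filter_filter]
  apply List.filter_congr
  intro p hp
  have hpn : p < done.length := List.mem_range.mp hp
  have h1 : (done.set q true).getD p false = (done.set q true)[p]'(by simpa using hpn) :=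
    List.getD_eq_getElem _ _ (by simpa using hpn)
  have h2 : done.getD p false = done[p]'hpn := List.getD_eq_getElem _ _ hpn
  rw [h1, h2, List.getElem_set]
  by_cases hpq : p = q
  · simp [hpq]
  · simp [hpq, Ne.symm hpq]

theorem trA_eq_Bval (fuel : Nat) : ∀ (done : List Bool) (i : Int), 0 < done.length →
    -(done.length : Int) ≤ i → i < done.length → (falsePos done).length < fuel →
    trA fuel done i = Bval done i := by
  induction fuel with
  | zero => intro done i hn h1 h2 hlt; omega
  | succ f ih =>
      intro done i hn h1 h2 hlt
      by_cases hF : falsePos done = []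
      · have hw := walkA_all_true hF hn done.length i h1 h2
        have h0 : trA (f + 1) done i = 0 := by rw [trA]; simp [hw]
        rw [h0]
        unfold Bval
        rw [hF]
        rfl
      · have hne : ((falsePos done).map (fun p => (cdist done.length i p).toNat)) ≠ [] := by
          simp [hF]
        obtain ⟨c, hcmem, hcmin⟩ := exists_min _ hne
        obtain ⟨q0, hq0mem, hq0eq⟩ := List.mem_map.mp hcmem
        have hcq0 : cdist done.length i q0 = (c : Int) := by
          have := cdist_nonneg hn i q0; omega
        have hminI : ∀ p ∈ falsePos done, (c : Int) ≤ cdist done.length i p := by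
          intro p hp
          have h := hcmin _ (List.mem_map_of_mem hp)
          have h0 := cdist_nonneg hn i p
          omega
        have hclt : c < done.length := by
          have := cdist_lt hn i q0; omega
        obtain ⟨pi, hw, hp1, hp2, hmem, hdist⟩ :=
          walkA_finds hn c i done.length hclt h1 h2 hminI ⟨q0, hq0mem, hcq0⟩
        set q := toIdx done.length pi with hqdef
        have hqlt : q < done.length := (mem_falsePos.mp hmem).1
        have hstep : trA (f + 1) done i = (c : Int) + trA f (done.set q true) pi := by
          rw [trA]
          simp only [hw]
          rw [if_neg (by push_cast; omega), pySetTrue_eq done pi hp1 hp2]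
        have hlen : (done.set q true).length = done.length := List.length_set
        have hFP : falsePos (done.set q true) = (falsePos done).filter (fun p => p ≠ q) :=
          falsePos_set hqlt
        have hlt' : (falsePos (done.set q true)).length < f := by
          rw [hFP]
          have hx : ((falsePos done).filter (fun p => p ≠ q)).length < (falsePos done).length :=
            List.length_filter_lt_length_iff_exists.mpr ⟨q, hmem, by simp⟩
          omega
        have hIH := ih (done.set q true) pi (by omega) (by rw [hlen]; exact hp1)
          (by rw [hlen]; exact hp2) hlt'
        rw [hstep, hIH]
        unfold Bval
        rw [hFP, hlen]
        have hdq : cdist done.length pi q = 0 := by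
          have hs := cdist_shift (p := q) hn hp1 hp2 hqlt hdist (le_of_eq hdist.symm)
          rw [hdist] at hs
          omega
        have hfilter : ((((falsePos done).filter (fun p => p ≠ q)).map
              (fun (p : Nat) => ((p : Int) - pi) % (done.length : Int))).foldl max 0) =
            (((falsePos done).map (fun (p : Nat) => ((p : Int) - pi) % (done.length : Int))).foldl max 0) := by
          apply foldl_max_filter
          · exact le_refl 0
          · intro x hx hgx
            have hxq : x = q := by simpa using hgx
            subst hxq
            unfold cdist at hdq
            omega
        have hmapc : (falsePos done).map (fun (p : Nat) => ((p : Int) - i) % (done.length : Int)) =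
            (falsePos done).map (fun (p : Nat) => (c : Int) + ((p : Int) - pi) % (done.length : Int)) :=
          List.map_congr_left (fun p hp => by
            have hs := cdist_shift hn hp1 hp2 (mem_falsePos.mp hp).1 hdist (hminI p hp)
            unfold cdist at hs
            omega)
        rw [hfilter, hmapc]
        have h0 : (0 : Int) = (c : Int) + (-(c : Int)) := by ring
        rw [h0, foldl_max_add]
        congr 1
        set L := (falsePos done).map (fun (p : Nat) => ((p : Int) - pi) % (done.length : Int)) with hL
        have hq0 : (0 : Int) ∈ L := by
          rw [hL]
          refine List.mem_map.mpr ⟨q, hmem, ?_⟩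
          unfold cdist at hdq
          omega
        have hge0 : 0 ≤ L.foldl max (-(c : Int)) := (PySem.List.le_foldl_max L _).2 _ hq0
        calc L.foldl max ((c : Int) + (-(c : Int)))
            = L.foldl max (max 0 (-(c : Int))) := by
              congr 1
              have : ((c : Int)) + (-(c : Int)) = 0 := by ring
              rw [this, max_eq_left (by omega)]
          _ = max 0 (L.foldl max (-(c : Int))) := foldl_max_shift L 0 (-(c : Int))
          _ = L.foldl max (-(c : Int)) := max_eq_right hge0

theorem traverse_right_eq (done : List Bool) (i : Int) (h : Pre_traverse_right done i) :
    traverse_right done i = traverse_right_alt done i := by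
  rcases h with h | h
  · subst h
    rfl
  · by_cases hn : done.length = 0
    · exfalso; omega
    · rw [traverse_right, alt_eq_Bval done i (by omega)]
      refine trA_eq_Bval (done.length + 1) done i (by omega) h.1 h.2 ?_
      have hle : (falsePos done).length ≤ done.length := by
        have := List.length_filter_le (fun p => !done.getD p false) (List.range done.length)
        unfold falsePos
        simpa using this
      omega

-- ===== VERDICT (by name: the statement is the Claim_ definition above) =====
theorem traverse_right_spec : Claim_equal_traverse_right := by
  intro done i _ hpre
  unfold Spec_traverse_right
  exact traverse_right_eq done i hpre
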